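-- pv_equiv track=rewrite | github.com/wangzitian0/finance_report | scripts/test_lifecycle.py | _sanitize_namespace
-- ===== SOURCE A (Python) =====
-- def _sanitize_namespace(name: str) -> str:
--     """Convert branch name to safe identifier."""
--     if not name or not name.strip():
--         raise ValueError(f"Invalid namespace '{name}'")
--     safe = name.lower().replace("/", "_").replace("-", "_")
--     safe = "".join(c if c.isalnum() or c == "_" else "" for c in safe)
--     while "__" in safe:
--         safe = safe.replace("__", "_")
--     safe = safe.strip("_")
--     if not safe:
--         raise ValueError(f"Invalid namespace '{name}'")
--     return safe
-- ===== SOURCE B (Python) =====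
-- def _sanitize_namespace(name: str) -> str:
--     """Convert branch name to safe identifier."""
--     if not name or not name.strip():
--         raise ValueError(f"Invalid namespace '{name}'")
--     tokens = []
--     cur = ""
--     for c in name.lower():
--         if c.isalnum():
--             cur += c
--         elif c in "/-_":
--             if cur:
--                 tokens.append(cur)
--             cur = ""
--         # any other character is dropped
--     if cur:
--         tokens.append(cur)
--     if not tokens:
--         raise ValueError(f"Invalid namespace '{name}'")
--     return "_".join(tokens)
-- ===== Notes on version B (the rewrite author's own statement) =====
-- stated objective: alternative
-- what changed: A sanitizes via repeated whole-string passes (two separator replaces, a character filter, a fixpoint loop that collapses doubled underscores, then an underscore strip); B does one left-to-right scan of the lowercased name that accumulates alphanumeric runs as tokens, flushing the current token at separator characters (slash, hyphen, underscore) and dropping every other character, and returns the tokens joined by single underscores.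
import Mathlib
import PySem

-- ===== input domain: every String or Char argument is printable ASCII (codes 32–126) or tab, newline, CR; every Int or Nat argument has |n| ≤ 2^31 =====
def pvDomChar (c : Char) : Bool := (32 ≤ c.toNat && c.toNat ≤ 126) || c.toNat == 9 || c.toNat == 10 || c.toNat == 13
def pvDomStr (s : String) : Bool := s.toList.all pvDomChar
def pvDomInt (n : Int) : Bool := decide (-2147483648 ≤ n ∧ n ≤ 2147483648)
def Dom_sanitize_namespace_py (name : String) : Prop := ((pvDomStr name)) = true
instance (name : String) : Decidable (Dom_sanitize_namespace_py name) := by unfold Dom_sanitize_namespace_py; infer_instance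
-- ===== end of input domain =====

-- B replaces A's multi-pass pipeline (replaces, filter, a fixpoint collapsing loop, strip)
-- by one left-to-right tokenizing pass joined with '_'; same return value, alternative algorithm.

-- ===== PORT A =====
-- the collapsing while-loop of A (replace doubled underscores until none remain); fuel = |safe| suffices,
-- since every iteration that fires shortens the string (proved in collapseLoopA_eq_squeeze below)
def collapseLoopA : Nat → List Char → List Char
  | 0, s => s
  | n + 1, s =>
    if PySem.Chars.isIn ['_', '_'] s then collapseLoopA n (PySem.Chars.replace s ['_', '_'] ['_'])
    else s

def sanitize_namespace_py (name : String) : String :=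
  if name = "" ∨ PySem.Str.strip name = "" then ""   -- Python: raise ValueError (outside Pre_)
  else
    let safe1 := PySem.Str.replace (PySem.Str.replace (PySem.Str.lower name) "/" "_") "-" "_"
    -- "".join(c if c.isalnum() or c == "_" else "" for c in safe)
    let safe2 := safe1.toList.filter (fun c => PySem.Chars.isalnum c || c == '_')
    let safe3 := collapseLoopA safe2.length safe2
    let safe4 := PySem.Chars.stripChars safe3 ['_']   -- safe.strip("_")
    if safe4.isEmpty then ""   -- Python: raise ValueError (outside Pre_)
    else String.mk safe4

-- ===== PORT B =====
-- one step of B's scan: state = (finished tokens, current token)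
def altStep (st : List (List Char) × List Char) (c : Char) : List (List Char) × List Char :=
  if PySem.Chars.isalnum c then (st.1, st.2 ++ [c])
  else if c == '/' || c == '-' || c == '_' then
    ((if st.2.isEmpty then st.1 else st.1 ++ [st.2]), [])
  else st   -- any other character is dropped

def sanitize_namespace_py_alt (name : String) : String :=
  if name = "" ∨ PySem.Str.strip name = "" then ""   -- Python: raise ValueError (outside Pre_)
  else
    let st := (PySem.Str.lower name).toList.foldl altStep ([], [])
    let toks := if st.2.isEmpty then st.1 else st.1 ++ [st.2]
    String.mk (PySem.Chars.join ['_'] toks)   -- toks = []: Python: raise ValueError (outside Pre_)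

-- ===== PRECONDITION & SPEC =====
-- Pre_ excludes exactly the inputs on which Python A raises ValueError
-- (no alphanumeric character, so either the input is empty/whitespace or the sanitized string is empty);
-- B raises there as well.
def Pre_sanitize_namespace_py (name : String) : Prop :=
  name.toList.any PySem.Chars.isalnum = true
instance (name : String) : Decidable (Pre_sanitize_namespace_py name) := by
  unfold Pre_sanitize_namespace_py; infer_instance

def pvWitness_sanitize_namespace_py : String := "Feature/JIRA-123_fix"

def Spec_sanitize_namespace_py (name : String) (out : String) : Prop :=
  out = sanitize_namespace_py_alt name
instance (name : String) (out : String) : Decidable (Spec_sanitize_namespace_py name out) := by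
  unfold Spec_sanitize_namespace_py; infer_instance

-- ===== CLAIM (what is proved, stated in full; the proofs are below) =====
def Claim_equal_sanitize_namespace_py : Prop :=
  ∀ (name : String), Dom_sanitize_namespace_py name → Pre_sanitize_namespace_py name →
    Spec_sanitize_namespace_py name (sanitize_namespace_py name)

-- ===== LEMMAS AND PROOFS =====

-- proof-side vocabulary ------------------------------------------------------
def pU (c : Char) : Bool := c == '_'

-- one pass of Python's s.replace("__", "_")
def replaceDD : List Char → List Char
  | [] => []
  | c :: t =>
    if c == '_' && t.head? == some '_' then '_' :: replaceDD t.tail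
    else c :: replaceDD t
termination_by l => l.length
decreasing_by all_goals (simp [List.length_tail]; try omega)

-- '__' occurs as a substring
def hasDD : List Char → Bool
  | [] => false
  | c :: t => (c == '_' && t.head? == some '_') || hasDD t

-- collapse every run of underscores to a single underscore (the loop's fixpoint)
def squeeze : List Char → List Char
  | [] => []
  | c :: t =>
    if c == '_' && t.head? == some '_' then squeeze t
    else c :: squeeze t

-- the maximal alnum tokens of a '_'/alnum string
def T : List Char → List (List Char)
  | [] => []
  | c :: r =>
    if c == '_' then T r
    else (c :: r.takeWhile (fun d => !(d == '_'))) :: T (r.dropWhile (fun d => !(d == '_')))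
termination_by l => l.length
decreasing_by
  all_goals simp
  all_goals (have := List.length_dropWhile_le (fun d => !(d == '_')) r; try omega)

def lstripU (s : List Char) : List Char := s.dropWhile pU
def rstripU (s : List Char) : List Char := (s.reverse.dropWhile pU).reverse

-- B's scan restricted to the filtered alphabet: '_' flushes, anything else extends
def step2 (st : List (List Char) × List Char) (c : Char) : List (List Char) × List Char :=
  if c == '_' then ((if st.2.isEmpty then st.1 else st.1 ++ [st.2]), []) else (st.1, st.2 ++ [c])

def finalize (st : List (List Char) × List Char) : List (List Char) :=
  if st.2.isEmpty then st.1 else st.1 ++ [st.2]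

def rr (c : Char) : Char := if c == '-' then '_' else if c == '/' then '_' else c
def keepC (c : Char) : Bool := PySem.Chars.isalnum c || c == '_'

-- single-character replace is a map --------------------------------------------
theorem replace_single_go (a b : Char) :
    ∀ (fuel : Nat) (l acc : List Char), l.length ≤ fuel →
      PySem.Chars.replace.go [a] [b] fuel l acc
        = acc.reverse ++ l.map (fun c => if c == a then b else c) := by
  intro fuel
  induction fuel with
  | zero =>
    intro l acc h
    have : l = [] := List.eq_nil_of_length_eq_zero (Nat.le_zero.mp h)
    subst this; simp [PySem.Chars.replace.go]
  | succ n ih =>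
    intro l acc h
    cases l with
    | nil => simp [PySem.Chars.replace.go]
    | cons c t =>
      by_cases hc : c = a
      · subst hc
        have hpre : List.isPrefixOf [c] (c :: t) = true := by
          simp [List.isPrefixOf]
        simp only [PySem.Chars.replace.go, hpre, if_pos]
        rw [ih _ _ (by simp at h ⊢; try omega)]
        simp
      · have hpre : List.isPrefixOf [a] (c :: t) = false := by
          cases hb : (a == c) with
          | false => simp [List.isPrefixOf, hb]
          | true => simp at hb; exact absurd hb.symm hc
        simp only [PySem.Chars.replace.go, hpre, Bool.false_eq_true, if_false]
        rw [ih _ _ (by simp at h ⊢; try omega)]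
        simp [hc]
theorem replace_single (s : List Char) (a b : Char) :
    PySem.Chars.replace s [a] [b] = s.map (fun c => if c == a then b else c) := by
  rw [PySem.Chars.replace]
  simp only [List.isEmpty_cons, Bool.false_eq_true, if_false]
  simpa using replace_single_go a b s.length s [] le_rfl

-- "__" → "_" replace is replaceDD ----------------------------------------------
theorem replace_dd_go :
    ∀ (fuel : Nat) (l acc : List Char), l.length ≤ fuel →
      PySem.Chars.replace.go ['_', '_'] ['_'] fuel l acc = acc.reverse ++ replaceDD l := by
  intro fuel
  induction fuel with
  | zero =>
    intro l acc h
    have : l = [] := List.eq_nil_of_length_eq_zero (Nat.le_zero.mp h)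
    subst this; simp [PySem.Chars.replace.go, replaceDD]
  | succ n ih =>
    intro l acc h
    cases l with
    | nil => simp [PySem.Chars.replace.go, replaceDD]
    | cons c t =>
      cases t with
      | nil =>
        have hpre : List.isPrefixOf ['_', '_'] [c] = false := by simp [List.isPrefixOf]
        simp only [PySem.Chars.replace.go, hpre, Bool.false_eq_true, if_false]
        rw [ih _ _ (by simp at h ⊢; try omega)]
        simp [replaceDD]
      | cons d t2 =>
        by_cases hc : c = '_' ∧ d = '_'
        · obtain ⟨hc1, hc2⟩ := hc; subst hc1; subst hc2
          have hpre : List.isPrefixOf ['_', '_'] ('_' :: '_' :: t2) = true := by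
            simp [List.isPrefixOf]
          simp only [PySem.Chars.replace.go, hpre, if_pos]
          rw [ih _ _ (by simp at h ⊢; try omega)]
          simp [replaceDD]
        · have hpre : List.isPrefixOf ['_', '_'] (c :: d :: t2) = false := by
            simp [List.isPrefixOf]
            intro h1 h2; exact hc ⟨h1.symm, h2.symm⟩
          simp only [PySem.Chars.replace.go, hpre, Bool.false_eq_true, if_false]
          rw [ih _ _ (by simp at h ⊢; try omega)]
          have hcond : (c == '_' && (d :: t2).head? == some '_') = false := by
            simp; intro h1 h2; exact hc ⟨h1, h2⟩
          have hru : replaceDD (c :: d :: t2) = c :: replaceDD (d :: t2) := by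
            conv_lhs => rw [replaceDD]
            rw [if_neg (by rw [hcond]; simp)]
          rw [hru]
          simp
theorem replace_dd (s : List Char) :
    PySem.Chars.replace s ['_', '_'] ['_'] = replaceDD s := by
  rw [PySem.Chars.replace]
  simp only [List.isEmpty_cons, Bool.false_eq_true, if_false]
  simpa using replace_dd_go s.length s [] le_rfl

-- substring test is hasDD -------------------------------------------------------
theorem infix_dd_iff (s : List Char) : (['_', '_'] <:+: s) ↔ hasDD s = true := by
  induction s with
  | nil => simp [hasDD]
  | cons c t ih =>
    rw [List.infix_cons_iff]
    cases t with
    | nil => simp [hasDD]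
    | cons d t2 =>
      constructor
      · rintro (hpre | hinf)
        · rw [List.cons_prefix_cons] at hpre
          obtain ⟨h1, hpre⟩ := hpre
          rw [List.cons_prefix_cons] at hpre
          obtain ⟨h2, _⟩ := hpre
          simp [hasDD, h1.symm, h2.symm]
        · rw [show hasDD (c :: d :: t2)
                  = ((c == '_' && (d :: t2).head? == some '_') || hasDD (d :: t2)) from rfl,
              Bool.or_eq_true]
          exact Or.inr (ih.mp hinf)
      · intro h
        simp only [hasDD] at h
        rcases Bool.or_eq_true_iff.mp h with h | h
        · rcases Bool.and_eq_true_iff.mp h with ⟨h1, h2⟩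
          simp at h1 h2
          left; subst h1; subst h2
          exact List.cons_prefix_cons.mpr ⟨rfl, List.cons_prefix_cons.mpr ⟨rfl, by simp⟩⟩
        · right; exact ih.mpr h
theorem isIn_dd (s : List Char) : PySem.Chars.isIn ['_', '_'] s = hasDD s := by
  by_cases h : hasDD s = true
  · rw [h, (PySem.Chars.isIn_iff_infix _ _).mpr ((infix_dd_iff s).mpr h)]
  · simp at h
    rw [h]
    by_contra hx
    simp at hx
    exact absurd ((infix_dd_iff s).mp ((PySem.Chars.isIn_iff_infix _ _).mp hx)) (by simp [h])

-- replaceDD shortens while '__' is present --------------------------------------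
theorem length_replaceDD_le (s : List Char) : (replaceDD s).length ≤ s.length := by
  induction s using replaceDD.induct with
  | case1 => simp [replaceDD]
  | case2 c t h ih =>
    rw [replaceDD, if_pos h]
    rcases Bool.and_eq_true_iff.mp h with ⟨_, h2⟩
    cases t with
    | nil => simp at h2
    | cons d t2 => simp at ih ⊢; omega
  | case3 c t h ih =>
    rw [replaceDD, if_neg (by simp_all)]
    simpa using ih
theorem length_replaceDD_lt (s : List Char) (h : hasDD s = true) :
    (replaceDD s).length < s.length := by
  induction s using replaceDD.induct with
  | case1 => simp [hasDD] at h
  | case2 c t hc ih =>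
    rw [replaceDD, if_pos hc]
    rcases Bool.and_eq_true_iff.mp hc with ⟨_, h2⟩
    cases t with
    | nil => simp at h2
    | cons d t2 =>
      have := length_replaceDD_le t2
      simp at this ⊢; omega
  | case3 c t hc ih =>
    rw [replaceDD, if_neg (by simp_all)]
    have ht : hasDD t = true := by
      simp only [hasDD] at h
      rcases Bool.or_eq_true_iff.mp h with h | h
      · exact absurd h (by simp_all)
      · exact h
    simpa using ih ht

-- squeeze facts ------------------------------------------------------------------
theorem squeeze_cons_ne (c : Char) (x : List Char) (h : ¬ c = '_') :
    squeeze (c :: x) = c :: squeeze x := by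
  rw [squeeze, if_neg (by simp [h])]
theorem head?_squeeze (x : List Char) : (squeeze x).head? = x.head? := by
  induction x using squeeze.induct with
  | case1 => simp [squeeze]
  | case2 c t h ih =>
    rw [squeeze, if_pos h]
    rcases Bool.and_eq_true_iff.mp h with ⟨h1, h2⟩
    simp at h1
    rw [ih, h1]
    cases t with
    | nil => simp at h2
    | cons d t2 =>
      simp at h2 ⊢
      first | exact h2 | exact h2.symm
  | case3 c t h ih => rw [squeeze, if_neg (by simp_all)]; simp
theorem squeeze_u_cons (x : List Char) :
    squeeze ('_' :: x) = if (squeeze x).head? == some '_' then squeeze x else '_' :: squeeze x := by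
  rw [head?_squeeze]
  cases x with
  | nil => simp [squeeze]
  | cons d t =>
    by_cases hd : d = '_'
    · subst hd; rw [squeeze, if_pos (by simp)]; simp
    · rw [squeeze, if_neg (by simp [hd])]; simp [hd]
theorem squeeze_replaceDD (s : List Char) : squeeze (replaceDD s) = squeeze s := by
  induction s using replaceDD.induct with
  | case1 => simp [replaceDD]
  | case2 c t h ih =>
    rcases Bool.and_eq_true_iff.mp h with ⟨h1, h2⟩
    simp at h1; subst h1
    cases t with
    | nil => simp at h2
    | cons d t2 =>
      simp at h2; subst h2
      rw [replaceDD, if_pos h]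
      simp only [List.tail_cons] at ih ⊢
      rw [show squeeze ('_' :: '_' :: t2) = squeeze ('_' :: t2) from by rw [squeeze, if_pos (by simp)]]
      rw [squeeze_u_cons, squeeze_u_cons, ih]
  | case3 c t h ih =>
    rw [replaceDD, if_neg (by simp_all)]
    by_cases hc : c = '_'
    · subst hc
      rw [squeeze_u_cons, squeeze_u_cons, ih]
    · rw [squeeze_cons_ne _ _ hc, squeeze_cons_ne _ _ hc, ih]
theorem squeeze_of_not_hasDD (s : List Char) (h : hasDD s = false) : squeeze s = s := by
  induction s with
  | nil => simp [squeeze]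
  | cons c t ih =>
    simp only [hasDD, Bool.or_eq_false_iff] at h
    rw [squeeze, if_neg (by simp [h.1]), ih h.2]
theorem collapseLoopA_eq_squeeze :
    ∀ (fuel : Nat) (s : List Char), s.length ≤ fuel → collapseLoopA fuel s = squeeze s := by
  intro fuel
  induction fuel with
  | zero =>
    intro s h
    have : s = [] := List.eq_nil_of_length_eq_zero (Nat.le_zero.mp h)
    subst this; simp [collapseLoopA, squeeze]
  | succ n ih =>
    intro s h
    rw [collapseLoopA, isIn_dd, replace_dd]
    by_cases hd : hasDD s = true
    · rw [if_pos hd, ih _ (by have := length_replaceDD_lt s hd; omega), squeeze_replaceDD]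
    · simp at hd
      rw [if_neg (by simp [hd]), squeeze_of_not_hasDD s hd]

-- squeeze / strip structure ------------------------------------------------------
theorem squeeze_u_dropWhile (x : List Char) :
    squeeze ('_' :: x) = '_' :: squeeze (x.dropWhile pU) := by
  induction x with
  | nil => simp [squeeze, pU]
  | cons d t ih =>
    by_cases hd : d = '_'
    · subst hd
      rw [show squeeze ('_' :: '_' :: t) = squeeze ('_' :: t) from by rw [squeeze, if_pos (by simp)]]
      rw [ih]
      simp [List.dropWhile_cons, pU]
    · rw [squeeze, if_neg (by simp [hd])]
      simp [List.dropWhile_cons, pU, hd]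
theorem squeeze_clean_append (tw d : List Char) (h : ∀ c ∈ tw, ¬ c = '_') :
    squeeze (tw ++ d) = tw ++ squeeze d := by
  induction tw with
  | nil => simp
  | cons c t ih =>
    have hc := h c (by simp)
    rw [List.cons_append, squeeze_cons_ne _ _ hc, ih (fun x hx => h x (by simp [hx]))]
    simp
theorem dropWhileU_clean (l : List Char) (h : ∀ c ∈ l, ¬ c = '_') : l.dropWhile pU = l := by
  cases l with
  | nil => simp
  | cons c t => rw [List.dropWhile_cons, if_neg (by simp [pU]; exact h c (by simp))]
theorem rstripU_clean_append (tw x : List Char) (h : ∀ c ∈ tw, ¬ c = '_') :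
    rstripU (tw ++ x) = tw ++ rstripU x := by
  unfold rstripU
  rw [List.reverse_append, List.dropWhile_append]
  by_cases he : (x.reverse.dropWhile pU).isEmpty = true
  · rw [if_pos he]
    rw [List.isEmpty_iff] at he
    rw [he, dropWhileU_clean _ (fun c hc => h c (by simpa using hc))]
    simp
  · rw [if_neg he]; simp
theorem rstripU_u_cons (x : List Char) :
    rstripU ('_' :: x) = if (rstripU x).isEmpty then [] else '_' :: rstripU x := by
  unfold rstripU
  rw [show ('_' :: x).reverse = x.reverse ++ ['_'] from by simp, List.dropWhile_append]
  by_cases he : (x.reverse.dropWhile pU).isEmpty = true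
  · rw [if_pos he, if_pos (by simpa using he)]
    simp [List.dropWhile_cons, pU]
  · rw [if_neg he, if_neg (by simpa using he)]
    simp
theorem rstripU_cons_ne (c : Char) (x : List Char) (h : ¬ c = '_') :
    rstripU (c :: x) = c :: rstripU x := by
  unfold rstripU
  rw [show (c :: x).reverse = x.reverse ++ [c] from by simp, List.dropWhile_append]
  by_cases he : (x.reverse.dropWhile pU).isEmpty = true
  · rw [if_pos he]
    rw [List.isEmpty_iff] at he
    rw [he]
    simp [List.dropWhile_cons, pU, h]
  · rw [if_neg he]; simp

-- T facts ------------------------------------------------------------------------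
theorem T_u_cons (r : List Char) : T ('_' :: r) = T r := by
  rw [T, if_pos (by simp)]
theorem T_cons_ne (c : Char) (r : List Char) (h : ¬ c = '_') :
    T (c :: r) = (c :: r.takeWhile (fun d => !(d == '_'))) :: T (r.dropWhile (fun d => !(d == '_'))) := by
  rw [T, if_neg (by simp [h])]
theorem T_dropWhileU (r : List Char) : T (r.dropWhile pU) = T r := by
  induction r with
  | nil => simp
  | cons c t ih =>
    by_cases hc : c = '_'
    · subst hc
      rw [List.dropWhile_cons, if_pos (by simp [pU]), ih, T_u_cons]
    · rw [List.dropWhile_cons, if_neg (by simp [pU, hc])]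
theorem T_mem_ne_nil (x : List Char) : ∀ t ∈ T x, t ≠ [] := by
  induction x using T.induct with
  | case1 => simp [T]
  | case2 c r h ih => rw [T, if_pos h]; exact ih
  | case3 c r h ih =>
    rw [T, if_neg h]
    intro t ht
    rcases List.mem_cons.mp ht with ht | ht
    · subst ht; simp
    · exact ih t ht
theorem join_T_nil_iff (x : List Char) :
    PySem.Chars.join ['_'] (T x) = [] ↔ T x = [] := by
  cases hT : T x with
  | nil => simp [PySem.Chars.join_nil]
  | cons t ts =>
    have ht : t ≠ [] := T_mem_ne_nil x t (by rw [hT]; simp)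
    cases ts with
    | nil => rw [PySem.Chars.join_singleton]; simp [ht]
    | cons t2 ts2 =>
      rw [PySem.Chars.join_cons_cons]
      simp [ht]

-- head of a pU-dropWhile is never '_' --------------------------------------------
theorem head_dropWhileU (r : List Char) :
    r.dropWhile pU = [] ∨ ∃ c t, r.dropWhile pU = c :: t ∧ ¬ c = '_' := by
  induction r with
  | nil => simp
  | cons c t ih =>
    by_cases hc : c = '_'
    · subst hc; rw [List.dropWhile_cons, if_pos (by simp [pU])]; exact ih
    · rw [List.dropWhile_cons, if_neg (by simp [pU, hc])]
      exact Or.inr ⟨c, t, rfl, hc⟩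
theorem lstripU_squeeze_dropWhileU (r : List Char) :
    lstripU (squeeze (r.dropWhile pU)) = squeeze (r.dropWhile pU) := by
  rcases head_dropWhileU r with h | ⟨c, t, h, hc⟩
  · rw [h]; simp [squeeze, lstripU]
  · rw [h, squeeze_cons_ne _ _ hc]
    unfold lstripU
    rw [List.dropWhile_cons, if_neg (by simp [pU, hc])]

-- MAIN: A's squeeze-and-strip equals B's token join -------------------------------
theorem strip_squeeze_eq_join :
    ∀ (n : Nat) (us : List Char), us.length ≤ n →
      rstripU (lstripU (squeeze us)) = PySem.Chars.join ['_'] (T us) := by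
  intro n
  induction n with
  | zero =>
    intro us h
    have : us = [] := List.eq_nil_of_length_eq_zero (Nat.le_zero.mp h)
    subst this
    simp [squeeze, lstripU, rstripU, T, PySem.Chars.join_nil]
  | succ n ih =>
    intro us h
    cases us with
    | nil => simp [squeeze, lstripU, rstripU, T, PySem.Chars.join_nil]
    | cons c r =>
      by_cases hc : c = '_'
      · -- leading underscore: both sides ignore it
        subst hc
        rw [squeeze_u_dropWhile]
        rw [show lstripU ('_' :: squeeze (r.dropWhile pU)) = lstripU (squeeze (r.dropWhile pU)) from by
          unfold lstripU; rw [List.dropWhile_cons, if_pos (by simp [pU])]]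
        rw [lstripU_squeeze_dropWhileU]
        have hlen : (r.dropWhile pU).length ≤ n := by
          have := List.length_dropWhile_le pU r
          simp at h; omega
        calc rstripU (squeeze (r.dropWhile pU))
            = rstripU (lstripU (squeeze (r.dropWhile pU))) := by rw [lstripU_squeeze_dropWhileU]
          _ = PySem.Chars.join ['_'] (T (r.dropWhile pU)) := ih _ hlen
          _ = PySem.Chars.join ['_'] (T ('_' :: r)) := by rw [T_dropWhileU, T_u_cons]
      · -- c starts a token
        rw [squeeze_cons_ne _ _ hc]
        rw [show lstripU (c :: squeeze r) = c :: squeeze r from by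
          unfold lstripU; rw [List.dropWhile_cons, if_neg (by simp [pU, hc])]]
        rw [rstripU_cons_ne _ _ hc]
        -- split r into its clean prefix tw and the rest d
        have hsplit : r = r.takeWhile (fun d => !(d == '_')) ++ r.dropWhile (fun d => !(d == '_')) :=
          (List.takeWhile_append_dropWhile).symm
        set tw := r.takeWhile (fun d => !(d == '_')) with htw
        set d := r.dropWhile (fun d => !(d == '_')) with hd
        have htwclean : ∀ x ∈ tw, ¬ x = '_' := by
          intro x hx
          have := List.mem_takeWhile_imp hx
          simpa using this
        rw [show squeeze r = tw ++ squeeze d from by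
          conv_lhs => rw [hsplit]
          exact squeeze_clean_append tw d htwclean]
        rw [rstripU_clean_append tw _ htwclean]
        have hdlen : d.length ≤ r.length := hd ▸ List.length_dropWhile_le _ r
        -- compute rstripU (squeeze d) for d = [] or d starting with '_'
        have hdshape : d = [] ∨ ∃ d', d = '_' :: d' := by
          cases hdc : d with
          | nil => exact Or.inl rfl
          | cons x xs =>
            right
            refine ⟨xs, ?_⟩
            have : ¬ (fun d => !(d == '_')) x = true := by
              have := List.head?_dropWhile_not (fun d => !(d == '_')) r
              rw [← hd, hdc] at this
              simpa using this
            simp at this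
            rw [this]
        have hkey : rstripU (squeeze d)
            = if (T d).isEmpty then [] else '_' :: PySem.Chars.join ['_'] (T d) := by
          rcases hdshape with hnil | ⟨d', hdd⟩
          · rw [hnil]; simp [squeeze, rstripU, T]
          · conv_lhs => rw [hdd]
            rw [squeeze_u_dropWhile, rstripU_u_cons]
            have hlen2 : (d'.dropWhile pU).length ≤ n := by
              have h1 := List.length_dropWhile_le pU d'
              have : d.length ≤ r.length := hdlen
              rw [hdd] at this
              simp at h this ⊢; omega
            have hrec : rstripU (squeeze (d'.dropWhile pU)) = PySem.Chars.join ['_'] (T d) := by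
              calc rstripU (squeeze (d'.dropWhile pU))
                  = rstripU (lstripU (squeeze (d'.dropWhile pU))) := by rw [lstripU_squeeze_dropWhileU]
                _ = PySem.Chars.join ['_'] (T (d'.dropWhile pU)) := ih _ hlen2
                _ = PySem.Chars.join ['_'] (T d) := by rw [T_dropWhileU, hdd, T_u_cons]
            rw [hrec]
            have hiff : (PySem.Chars.join ['_'] (T d)).isEmpty = (T d).isEmpty := by
              by_cases hT : T d = []
              · simp [hT, PySem.Chars.join_nil]
              · have h1 : PySem.Chars.join ['_'] (T d) ≠ [] := fun hx => hT ((join_T_nil_iff d).mp hx)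
                have e1 : (PySem.Chars.join ['_'] (T d)).isEmpty = false := by
                  cases hj : (PySem.Chars.join ['_'] (T d)).isEmpty
                  · rfl
                  · exact absurd (List.isEmpty_iff.mp hj) h1
                have e2 : (T d).isEmpty = false := by
                  cases hj : (T d).isEmpty
                  · rfl
                  · exact absurd (List.isEmpty_iff.mp hj) hT
                rw [e1, e2]
            rw [hiff]
        rw [hkey, T_cons_ne _ _ hc, ← htw, ← hd]
        cases hT : T d with
        | nil => simp [hT, PySem.Chars.join_singleton]
        | cons t ts =>
          rw [PySem.Chars.join_cons_cons]
          simp [hT]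

-- B's fold over the raw string equals the step2 fold over the filtered string -----
theorem foldl_altStep_eq_step2 (ls : List Char) :
    ∀ st, ls.foldl altStep st = ((ls.map rr).filter keepC).foldl step2 st := by
  induction ls with
  | nil => intro st; simp
  | cons c t ih =>
    intro st
    rw [List.foldl_cons, List.map_cons]
    by_cases halnum : PySem.Chars.isalnum c = true
    · have h1 : ¬ c = '/' := fun h => by rw [h] at halnum; exact absurd halnum (by decide)
      have h2 : ¬ c = '-' := fun h => by rw [h] at halnum; exact absurd halnum (by decide)
      have h3 : ¬ c = '_' := fun h => by rw [h] at halnum; exact absurd halnum (by decide)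
      rw [show rr c = c from by simp [rr, h1, h2]]
      rw [List.filter_cons, if_pos (by simp [keepC, halnum])]
      rw [List.foldl_cons]
      rw [show altStep st c = step2 st c from by
        simp [altStep, step2, halnum, h3]]
      exact ih _
    · by_cases hsep : c = '/' ∨ c = '-' ∨ c = '_'
      · have hrr : rr c = '_' := by
          rcases hsep with h | h | h <;> subst h <;> simp [rr]
        rw [hrr, List.filter_cons, if_pos (by simp [keepC])]
        rw [List.foldl_cons]
        rw [show altStep st c = step2 st '_' from by
          have : (c == '/' || c == '-' || c == '_') = true := by
            rcases hsep with h | h | h <;> simp [h]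
          simp [altStep, step2, halnum, this]]
        exact ih _
      · push_neg at hsep
        obtain ⟨h1, h2, h3⟩ := hsep
        rw [show rr c = c from by simp [rr, h1, h2]]
        rw [List.filter_cons, if_neg (by simp [keepC, halnum, h3])]
        rw [show altStep st c = st from by simp [altStep, halnum, h1, h2, h3]]
        exact ih _

-- the step2 fold produces exactly the tokens T ------------------------------------
theorem takeWhile_clean_append_u (t r : List Char) (h : ∀ x ∈ t, ¬ x = '_') :
    (t ++ '_' :: r).takeWhile (fun d => !(d == '_')) = t := by
  induction t with
  | nil => simp
  | cons a s ih =>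
    rw [List.cons_append, List.takeWhile_cons, if_pos (by simp; exact h a (by simp))]
    rw [ih (fun x hx => h x (by simp [hx]))]
theorem dropWhile_clean_append_u (t r : List Char) (h : ∀ x ∈ t, ¬ x = '_') :
    (t ++ '_' :: r).dropWhile (fun d => !(d == '_')) = '_' :: r := by
  induction t with
  | nil => simp
  | cons a s ih =>
    rw [List.cons_append, List.dropWhile_cons, if_pos (by simp; exact h a (by simp))]
    exact ih (fun x hx => h x (by simp [hx]))
theorem T_clean (cur : List Char) (h : ∀ x ∈ cur, ¬ x = '_') :
    T cur = if cur.isEmpty then [] else [cur] := by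
  cases cur with
  | nil => simp [T]
  | cons c t =>
    rw [T_cons_ne _ _ (h c (by simp))]
    have ht : ∀ x ∈ t, ¬ x = '_' := fun x hx => h x (by simp [hx])
    rw [show t.takeWhile (fun d => !(d == '_')) = t from
          List.takeWhile_eq_self_iff.mpr (by intro x hx; simp [ht x hx])]
    rw [show t.dropWhile (fun d => !(d == '_')) = [] from
          List.dropWhile_eq_nil_iff.mpr (by intro x hx; simp [ht x hx])]
    simp [T]
theorem T_clean_append_u (cur r : List Char) (h : ∀ x ∈ cur, ¬ x = '_') :
    T (cur ++ '_' :: r) = (if cur.isEmpty then [] else [cur]) ++ T r := by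
  cases cur with
  | nil => simp [T_u_cons]
  | cons c t =>
    have ht : ∀ x ∈ t, ¬ x = '_' := fun x hx => h x (by simp [hx])
    rw [List.cons_append, T_cons_ne _ _ (h c (by simp))]
    rw [takeWhile_clean_append_u t r ht, dropWhile_clean_append_u t r ht, T_u_cons]
    simp
theorem foldl_step2_eq_T :
    ∀ (us : List Char) (acc : List (List Char)) (cur : List Char),
      (∀ x ∈ cur, ¬ x = '_') →
      finalize (us.foldl step2 (acc, cur)) = acc ++ T (cur ++ us) := by
  intro us
  induction us with
  | nil =>
    intro acc cur h
    rw [List.foldl_nil, List.append_nil, T_clean cur h]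
    unfold finalize
    by_cases hc : cur.isEmpty = true
    · rw [if_pos hc, if_pos hc, List.append_nil]
    · rw [if_neg hc, if_neg hc]
  | cons c t ih =>
    intro acc cur h
    rw [List.foldl_cons]
    by_cases hc : c = '_'
    · subst hc
      rw [show step2 (acc, cur) '_' = ((if cur.isEmpty then acc else acc ++ [cur]), []) from by
        simp [step2]]
      rw [ih _ [] (by simp)]
      rw [T_clean_append_u cur t h]
      by_cases he : cur.isEmpty = true <;> simp [he]
    · rw [show step2 (acc, cur) c = (acc, cur ++ [c]) from by simp [step2, hc]]
      rw [ih acc (cur ++ [c]) (by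
        intro x hx
        rcases List.mem_append.mp hx with hx | hx
        · exact h x hx
        · simp at hx; subst hx; exact hc)]
      simp

-- assembling the two ports ---------------------------------------------------------
theorem ports_eq (name : String) :
    sanitize_namespace_py name = sanitize_namespace_py_alt name := by
  unfold sanitize_namespace_py sanitize_namespace_py_alt
  by_cases hg : name = "" ∨ PySem.Str.strip name = ""
  · rw [if_pos hg, if_pos hg]
  · rw [if_neg hg, if_neg hg]
    simp only
    set ls := (PySem.Str.lower name).toList with hls
    -- A's filtered list equals (ls.map rr).filter keepC
    have hfl :
        (PySem.Str.replace (PySem.Str.replace (PySem.Str.lower name) "/" "_") "-" "_").toList.filter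
            (fun c => PySem.Chars.isalnum c || c == '_')
          = (ls.map rr).filter keepC := by
      rw [PySem.Str.toList_replace, PySem.Str.toList_replace]
      rw [show ("/" : String).toList = ['/'] from rfl, show ("-" : String).toList = ['-'] from rfl,
          show ("_" : String).toList = ['_'] from rfl]
      rw [replace_single, replace_single, List.map_map]
      rw [show ((fun c => if c == '-' then '_' else c) ∘ fun c => if c == '/' then '_' else c) = rr from by
        funext c
        by_cases h1 : c = '/'
        · subst h1; decide
        · by_cases h2 : c = '-'
          · subst h2; decide
          · simp [Function.comp, rr, h1, h2]]
      rfl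
    rw [hfl]
    set us := (ls.map rr).filter keepC with hus
    rw [collapseLoopA_eq_squeeze us.length us le_rfl]
    -- A's strip = rstripU ∘ lstripU
    have hstrip : PySem.Chars.stripChars (squeeze us) ['_'] = rstripU (lstripU (squeeze us)) := by
      unfold PySem.Chars.stripChars rstripU lstripU
      have : (fun c => List.contains ['_'] c) = pU := by
        funext c
        unfold pU
        simp
        cases hc : (c == '_') with
        | true => simp at hc; simp [hc]
        | false => simp at hc; simp [hc]
      rw [this]
    rw [hstrip, strip_squeeze_eq_join us.length us le_rfl]
    -- B's side
    rw [foldl_altStep_eq_step2 ls ([], [])]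
    have hB := foldl_step2_eq_T ((ls.map rr).filter keepC) [] [] (by simp)
    unfold finalize at hB
    rw [← hus] at hB
    rw [hB]
    simp only [List.nil_append]
    by_cases he : (PySem.Chars.join ['_'] (T us)).isEmpty = true
    · rw [if_pos he]
      rw [List.isEmpty_iff] at he
      rw [he]
      decide
    · rw [if_neg he]

-- ===== VERDICT (by name: the statement is the Claim_ definition above) =====
theorem sanitize_namespace_py_spec : Claim_equal_sanitize_namespace_py := by
  intro name _ _
  unfold Spec_sanitize_namespace_py
  exact ports_eq name
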